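-- pv_equiv track=rewrite | github.com/ddideu/ddideu | 알고리즘 문제/알고리즘 스터디/카드1.py | card
-- ===== SOURCE A (Python) =====
-- def card(N): # 함수 생성
--     stack_1 = []  # 숫자를 저장할 리스트
--     stack_2 = []  # 결과를 출력할 리스트
--     for i in range(N, 0, -1): # for 문으로
--         stack_1.append(i)  # 1번 스택에 입력받은 숫자를 1씩 차감해서 집어 넣는다.
--     count = 0  # 해당 문자를 넣을지 말지 판별하는 카운트
--     while stack_1:  # stack_1이 비어 있지 않을때까지
--         S = stack_1.pop()  # stack_1의 제일 마지막 요소 pop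
--         if count == 0:  # 0이라면
--             count += 1  # 카운트를 하나 증가시키고
--             stack_2.append(S)  #  결과 출력 리스트에 추가
--         else: # 0이 아니라면
--             count += 1  # 카운트를 하나 증가시키고
--             stack_1.insert(0, S)  # pop 한 요소를 stack_1의 0번 위치에 추가
--         count %= 2  # count 를2로 나눈 나머지가 앞으로 카운트
--     return stack_2  # stack_2 반환
-- ===== SOURCE B (Python) =====
-- def card(N):
--     q = list(range(1, N + 1))
--     result = []
--     discard = True
--     while q:
--         next_q = []
--         for c in q:
--             if discard:
--                 result.append(c)
--             else:
--                 next_q.append(c)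
--             discard = not discard
--         q = next_q
--     return result
-- ===== Notes on version B (the rewrite author's own statement) =====
-- stated objective: faster
-- what changed: replaces the one-card-per-iteration rotating-queue simulation (pop from the end, insert(0,..) to re-queue, which shifts the whole list for every kept card) by a level-by-level sweep: each round partitions the current queue into discarded cards and the next round's queue in one pass, carrying the discard/keep phase across rounds
import Mathlib
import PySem

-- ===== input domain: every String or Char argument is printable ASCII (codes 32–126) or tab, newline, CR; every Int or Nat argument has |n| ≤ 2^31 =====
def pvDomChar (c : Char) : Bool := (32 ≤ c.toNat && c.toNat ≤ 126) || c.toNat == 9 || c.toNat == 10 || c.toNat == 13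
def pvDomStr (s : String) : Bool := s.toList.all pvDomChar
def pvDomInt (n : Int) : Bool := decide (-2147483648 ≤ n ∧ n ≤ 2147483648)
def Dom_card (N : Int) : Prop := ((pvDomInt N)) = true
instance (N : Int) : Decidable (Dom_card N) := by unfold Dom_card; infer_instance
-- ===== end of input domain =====

-- B replaces A's one-card-at-a-time rotating-queue simulation (pop from the end, insert(0,·))
-- by a level-by-level sweep that partitions each round's queue in one pass, carrying the
-- discard/keep phase across rounds (objective: alternative decomposition, same result).

-- ===== PORT A =====
-- A's while loop: pop the last element of stack_1; if count == 0 append it to stack_2,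
-- else insert it at position 0 of stack_1; count = (count+1) % 2.  The fuel argument only
-- makes the recursion total; 2*len+2 is proved sufficient below (cardLoopA_fuel).
def cardLoopA : Nat → List Int → Int → List Int → List Int
  | 0, _, _, s2 => s2
  | f + 1, s1, count, s2 =>
    match PySem.List.pop? s1 (-1) with
    | none => s2                     -- stack_1 empty: while loop exits
    | some (S, s1') =>
      if count = 0 then
        cardLoopA f s1' (PySem.Int.mod (count + 1) 2) (s2 ++ [S])
      else
        cardLoopA f (PySem.List.insert s1' 0 S) (PySem.Int.mod (count + 1) 2) s2

def card (N : Int) : List Int :=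
  -- for i in range(N, 0, -1): stack_1.append(i)
  let stack1 := (PySem.List.pyRange N 0 (-1)).foldl (fun s i => s ++ [i]) []
  cardLoopA (2 * stack1.length + 2) stack1 0 []

-- ===== PORT B =====
-- one round: B's inner for-loop over q (foldl over the state (result, next_q, discard))
def cardSweep (q : List Int) (res : List Int) (disc : Bool) : List Int × List Int × Bool :=
  q.foldl
    (fun acc c =>
      if acc.2.2 then (acc.1 ++ [c], acc.2.1, !acc.2.2)
      else (acc.1, acc.2.1 ++ [c], !acc.2.2))
    (res, [], disc)

-- proof-side recursive characterisation of one round, used by cardRounds' termination proof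
def sweepR : List Int → Bool → List Int × List Int × Bool
  | [], d => ([], [], d)
  | h :: t, d =>
    let s := sweepR t (!d)
    if d then (h :: s.1, s.2.1, s.2.2) else (s.1, h :: s.2.1, s.2.2)

theorem cardSweep_eq (q : List Int) (res nq : List Int) (d : Bool) :
    q.foldl
      (fun acc c =>
        if acc.2.2 then (acc.1 ++ [c], acc.2.1, !acc.2.2)
        else (acc.1, acc.2.1 ++ [c], !acc.2.2))
      (res, nq, d)
    = (res ++ (sweepR q d).1, nq ++ (sweepR q d).2.1, (sweepR q d).2.2) := by
  induction q generalizing res nq d with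
  | nil => simp [sweepR]
  | cons h t ih =>
    cases d with
    | true => simp [List.foldl_cons, sweepR, ih]
    | false => simp [List.foldl_cons, sweepR, ih]

theorem sweepR_measure (q : List Int) (d : Bool) (hq : q ≠ []) :
    2 * (sweepR q d).2.1.length + (if (sweepR q d).2.2 then 0 else 1)
      < 2 * q.length + (if d then 0 else 1) := by
  induction q generalizing d with
  | nil => exact absurd rfl hq
  | cons h t ih =>
    cases t with
    | nil => cases d <;> simp [sweepR]
    | cons h' t' =>
      have := ih (d := !d) (by simp)
      cases d <;> simp [sweepR] at this ⊢ <;> omega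

-- B's outer while loop over the rounds
def cardRounds (q : List Int) (res : List Int) (disc : Bool) : List Int :=
  if h : q = [] then res
  else
    let s := cardSweep q res disc
    cardRounds s.2.1 s.1 s.2.2
termination_by 2 * q.length + (if disc then 0 else 1)
decreasing_by
  simp only [cardSweep, cardSweep_eq, List.nil_append]
  exact sweepR_measure q disc h

def card_alt (N : Int) : List Int :=
  cardRounds (PySem.List.pyRange 1 (N + 1) 1) [] true

-- ===== PRECONDITION & SPEC =====
def Spec_card (N : Int) (out : List Int) : Prop := out = card_alt N
instance (N : Int) (out : List Int) : Decidable (Spec_card N out) := by unfold Spec_card; infer_instance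

-- ===== CLAIM (what is proved, stated in full; the proofs are below) =====
def Claim_equal_card : Prop := ∀ (N : Int), Dom_card N → Spec_card N (card N)

-- ===== LEMMAS AND PROOFS =====

-- A's loop seen on the reversed stack (a queue: pop-last = take head, insert-front = enqueue)
def loopAq : List Int → Bool → List Int → List Int
  | [], _, s2 => s2
  | h :: t, true, s2 => loopAq t false (s2 ++ [h])
  | h :: t, false, s2 => loopAq (t ++ [h]) true s2
termination_by q d _ => 2 * q.length + (if d then 0 else 1)
decreasing_by all_goals simp <;> omega

theorem cardLoopA_eq_loopAq (f : Nat) (q : List Int) (c : Int) (s2 : List Int)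
    (hc : c = 0 ∨ c = 1)
    (hf : f ≥ 2 * q.length + (if c = 0 then 1 else 2)) :
    cardLoopA f q.reverse c s2 = loopAq q (c == 0) s2 := by
  induction f generalizing q c s2 with
  | zero => rcases hc with rfl | rfl <;> simp at hf
  | succ f ih =>
    cases q with
    | nil =>
      rcases hc with rfl | rfl <;> simp [cardLoopA, loopAq, PySem.List.pop?]
    | cons h t =>
      have hpop : PySem.List.pop? (h :: t).reverse (-1) = some (h, t.reverse) := by
        have : (h :: t).reverse = t.reverse ++ [h] := by simp
        rw [this, PySem.List.pop?_last]
      rcases hc with rfl | rfl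
      · have h1 : PySem.Int.mod ((0 : Int) + 1) 2 = 1 := by decide
        simp only [cardLoopA, hpop, h1]
        have := ih t 1 (s2 ++ [h]) (Or.inr rfl) (by simp at hf ⊢; omega)
        simp only [this]
        simp [loopAq]
      · simp only [cardLoopA, hpop]
        norm_num
        rw [PySem.List.insert_zero]
        have hrev : h :: t.reverse = (t ++ [h]).reverse := by simp
        rw [hrev]
        have := ih (t ++ [h]) 0 s2 (Or.inl rfl) (by simp at hf ⊢; omega)
        simp only [this]
        simp [loopAq]

-- rotating queue = sweep the first round, then continue on what was kept
theorem loopAq_sweep (q : List Int) (k : List Int) (d : Bool) (s2 : List Int) :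
    loopAq (q ++ k) d s2
      = loopAq (k ++ (sweepR q d).2.1) (sweepR q d).2.2 (s2 ++ (sweepR q d).1) := by
  induction q generalizing k d s2 with
  | nil => simp [sweepR]
  | cons h t ih =>
    cases d with
    | true =>
      simp only [List.cons_append, loopAq, sweepR]
      rw [ih]
      simp
    | false =>
      simp only [List.cons_append, loopAq, sweepR]
      have : t ++ k ++ [h] = t ++ (k ++ [h]) := by simp
      rw [this, ih]
      simp

theorem cardRounds_eq_loopAq (q : List Int) (res : List Int) (d : Bool) :
    cardRounds q res d = loopAq q d res := by
  induction q, res, d using cardRounds.induct with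
  | case1 res d => simp [cardRounds, loopAq]
  | case2 q res d hq s ih =>
    rw [cardRounds]
    simp only [dif_neg hq]
    rw [ih]
    have hs2 : s = (res ++ (sweepR q d).1, (sweepR q d).2.1, (sweepR q d).2.2) := by
      simpa using cardSweep_eq q res [] d
    have := loopAq_sweep q [] d res
    simp only [List.append_nil, List.nil_append] at this
    rw [hs2, this]

theorem foldl_snoc (l acc : List Int) :
    l.foldl (fun s i => s ++ [i]) acc = acc ++ l := by
  induction l generalizing acc with
  | nil => simp
  | cons h t ih => simp [List.foldl_cons, ih]

-- ===== VERDICT (by name: the statement is the Claim_ definition above) =====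
theorem card_spec : Claim_equal_card := by
  intro N _
  unfold Spec_card card card_alt
  rw [foldl_snoc]
  simp only [List.nil_append]
  have hrev : PySem.List.pyRange N 0 (-1) = (PySem.List.pyRange 1 (N + 1) 1).reverse := by
    simpa using PySem.List.pyRange_neg_one_eq_reverse N 0
  rw [hrev, cardRounds_eq_loopAq]
  have := cardLoopA_eq_loopAq (2 * (PySem.List.pyRange 1 (N + 1) 1).reverse.length + 2)
      (PySem.List.pyRange 1 (N + 1) 1) 0 [] (Or.inl rfl) (by simp)
  simpa using this
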